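-- pv_equiv track=rewrite | github.com/rywager/anava-gcp-module | auto-config/camera_discovery.py | _parse_device_info
-- ===== SOURCE A (Python) =====
-- from typing import List, Dict, Optional, Set
--
-- def _parse_device_info(response_text: str, ip: str) -> Dict:
--     """Parse device info response"""
--     info = {
--         'ip': ip,
--         'mac': 'unknown',
--         'model': 'unknown',
--         'serial': 'unknown',
--         'firmware': 'unknown',
--         'name': f'axis-{ip}'
--     }
--
--     # Parse key-value pairs
--     for line in response_text.split('\n'):
--         if '=' in line:
--             key, value = line.split('=', 1)
--             key = key.strip().lower()
--             value = value.strip()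
--
--             if key == 'macaddress':
--                 info['mac'] = value
--             elif key == 'model':
--                 info['model'] = value
--             elif key == 'serialnumber':
--                 info['serial'] = value
--             elif key == 'version':
--                 info['firmware'] = value
--             elif key == 'hostname':
--                 info['name'] = value
--
--     return info
-- ===== SOURCE B (Python) =====
-- def _parse_device_info(response_text: str, ip: str):
--     """Parse device info response: collect all key=value pairs as a list, then
--     answer each field by a backward scan for the last matching key (no dict)."""
--     pairs = [(k.strip().lower(), v.strip())
--              for k, v in (line.split('=', 1)
--                           for line in response_text.split('\n') if '=' in line)]
--
--     def last_value(key, default):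
--         for k, v in reversed(pairs):
--             if k == key:
--                 return v
--         return default
--
--     return {
--         'ip': ip,
--         'mac': last_value('macaddress', 'unknown'),
--         'model': last_value('model', 'unknown'),
--         'serial': last_value('serialnumber', 'unknown'),
--         'firmware': last_value('version', 'unknown'),
--         'name': last_value('hostname', f'axis-{ip}'),
--     }
-- ===== Notes on version B (the rewrite author's own statement) =====
-- stated objective: alternative
-- what changed: B drops the mutated defaulted dict entirely: it first materialises the normalised key=value pairs as a plain list, then computes each of the five fields by an independent backward scan of that list for the last occurrence of its key (last-wins by search direction instead of by dict overwrite).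
import Mathlib
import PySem

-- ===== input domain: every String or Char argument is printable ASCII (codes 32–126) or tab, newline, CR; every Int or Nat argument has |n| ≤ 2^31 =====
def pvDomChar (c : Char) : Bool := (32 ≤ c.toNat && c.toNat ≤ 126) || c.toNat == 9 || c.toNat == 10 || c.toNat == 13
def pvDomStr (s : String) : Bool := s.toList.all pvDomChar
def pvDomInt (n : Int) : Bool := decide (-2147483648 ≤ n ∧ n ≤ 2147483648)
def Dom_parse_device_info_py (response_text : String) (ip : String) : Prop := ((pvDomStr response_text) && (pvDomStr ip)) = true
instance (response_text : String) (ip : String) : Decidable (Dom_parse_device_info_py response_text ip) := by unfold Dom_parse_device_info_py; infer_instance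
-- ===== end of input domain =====

-- B replaces A's mutated defaulted dict with a pairs list read by five backward last-match scans (objective: alternative).


-- ===== PORT A =====
def pvAStep (info : PySem.Dict String String) (line : String) : PySem.Dict String String :=
  if PySem.Str.isIn "=" line then
    match PySem.Str.splitMax? line "=" 1 with
    | some [k, v] =>
      let key := PySem.Str.lower (PySem.Str.strip k)
      let value := PySem.Str.strip v
      if key = "macaddress" then info.insert "mac" value
      else if key = "model" then info.insert "model" value
      else if key = "serialnumber" then info.insert "serial" value
      else if key = "version" then info.insert "firmware" value
      else if key = "hostname" then info.insert "name" value
      else info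
    | _ => info  -- unreachable: a line containing '=' splits into exactly two pieces
  else info

def parse_device_info_py (response_text : String) (ip : String) : List (String × String) :=
  let info := PySem.Dict.ofList [("ip", ip), ("mac", "unknown"), ("model", "unknown"),
    ("serial", "unknown"), ("firmware", "unknown"), ("name", "axis-" ++ ip)]
  (((PySem.Str.split? response_text "\n").getD []).foldl pvAStep info).items

-- ===== PORT B =====
-- the comprehension's element: normalised (key, value) of a line, none when '=' is absent
def pvParseLine (line : String) : Option (String × String) :=
  if PySem.Str.isIn "=" line then
    match PySem.Str.splitMax? line "=" 1 with
    | some [k, v] => some (PySem.Str.lower (PySem.Str.strip k), PySem.Str.strip v)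
    | _ => none  -- unreachable: a line containing '=' splits into exactly two pieces
  else none

-- the `for k, v in reversed(pairs)` loop: applied to pairs.reverse below
def pvLastValue : List (String × String) → String → String → String
  | [], _, d => d
  | (k, v) :: rest, key, d => if k = key then v else pvLastValue rest key d

def parse_device_info_py_alt (response_text : String) (ip : String) : List (String × String) :=
  let pairs := ((PySem.Str.split? response_text "\n").getD []).filterMap pvParseLine
  [("ip", ip),
   ("mac", pvLastValue pairs.reverse "macaddress" "unknown"),
   ("model", pvLastValue pairs.reverse "model" "unknown"),
   ("serial", pvLastValue pairs.reverse "serialnumber" "unknown"),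
   ("firmware", pvLastValue pairs.reverse "version" "unknown"),
   ("name", pvLastValue pairs.reverse "hostname" ("axis-" ++ ip))]

-- ===== PRECONDITION & SPEC =====
def Spec_parse_device_info_py (response_text : String) (ip : String) (out : List (String × String)) : Prop := out = parse_device_info_py_alt response_text ip
instance (response_text : String) (ip : String) (out : List (String × String)) : Decidable (Spec_parse_device_info_py response_text ip out) := by unfold Spec_parse_device_info_py; infer_instance

-- ===== CLAIM =====
def Claim_equal_parse_device_info_py : Prop := ∀ (response_text : String) (ip : String), Dom_parse_device_info_py response_text ip → Spec_parse_device_info_py response_text ip (parse_device_info_py response_text ip)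

-- ===== LEMMAS AND PROOFS =====

-- the fixed shape of A's info dict: keys never change, only the five parsed values do
def pvShape (i m mo s f n : String) : PySem.Dict String String :=
  PySem.Dict.mk [("ip", i), ("mac", m), ("model", mo), ("serial", s), ("firmware", f), ("name", n)]

theorem pvShape_insert_mac (i m mo s f n v : String) :
    (pvShape i m mo s f n).insert "mac" v = pvShape i v mo s f n := by
  apply PySem.Dict.ext
  simp [pvShape, PySem.Dict.items_insert, PySem.Dict.contains]

theorem pvShape_insert_model (i m mo s f n v : String) :
    (pvShape i m mo s f n).insert "model" v = pvShape i m v s f n := by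
  apply PySem.Dict.ext
  simp [pvShape, PySem.Dict.items_insert, PySem.Dict.contains]

theorem pvShape_insert_serial (i m mo s f n v : String) :
    (pvShape i m mo s f n).insert "serial" v = pvShape i m mo v f n := by
  apply PySem.Dict.ext
  simp [pvShape, PySem.Dict.items_insert, PySem.Dict.contains]

theorem pvShape_insert_firmware (i m mo s f n v : String) :
    (pvShape i m mo s f n).insert "firmware" v = pvShape i m mo s v n := by
  apply PySem.Dict.ext
  simp [pvShape, PySem.Dict.items_insert, PySem.Dict.contains]

theorem pvShape_insert_name (i m mo s f n v : String) :
    (pvShape i m mo s f n).insert "name" v = pvShape i m mo s f v := by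
  apply PySem.Dict.ext
  simp [pvShape, PySem.Dict.items_insert, PySem.Dict.contains]

-- A's step on the shape, expressed through B's line parser
theorem pvAStep_shape (i m mo s f n : String) (l : String) :
    pvAStep (pvShape i m mo s f n) l
    = match pvParseLine l with
      | none => pvShape i m mo s f n
      | some (key, v) =>
        pvShape i (if key = "macaddress" then v else m) (if key = "model" then v else mo)
          (if key = "serialnumber" then v else s) (if key = "version" then v else f)
          (if key = "hostname" then v else n) := by
  by_cases h : PySem.Str.isIn "=" l
  · rcases hs : PySem.Str.splitMax? l "=" 1 with _ | ⟨_ | ⟨k, _ | ⟨v, _ | ⟨x, rest⟩⟩⟩⟩ <;>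
      simp only [pvAStep, pvParseLine, h, if_true, hs]
    set key := PySem.Str.lower (PySem.Str.strip k) with hk
    set value := PySem.Str.strip v with hv
    by_cases h1 : key = "macaddress"
    · simp [h1, pvShape_insert_mac]
    by_cases h2 : key = "model"
    · simp [h1, h2, pvShape_insert_model]
    by_cases h3 : key = "serialnumber"
    · simp [h1, h2, h3, pvShape_insert_serial]
    by_cases h4 : key = "version"
    · simp [h1, h2, h3, h4, pvShape_insert_firmware]
    by_cases h5 : key = "hostname"
    · simp [h1, h2, h3, h4, h5, pvShape_insert_name]
    · simp only [h1, h2, h3, h4, h5, if_false]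
  · simp only [pvAStep, pvParseLine, h, Bool.false_eq_true, if_false]

-- B's lookup: field value = last matching pair, as a left fold of defaults
def pvLk (lines : List String) (key d : String) : String :=
  pvLastValue (lines.filterMap pvParseLine).reverse key d

theorem pvLastValue_append (xs : List (String × String)) (k v key d : String) :
    pvLastValue (xs ++ [(k, v)]) key d = pvLastValue xs key (if k = key then v else d) := by
  induction xs with
  | nil => rfl
  | cons p rest ih => cases p; simp only [List.cons_append, pvLastValue, ih]

theorem pvLk_cons (l : String) (rest : List String) (key d : String) :
    pvLk (l :: rest) key d
    = pvLk rest key (match pvParseLine l with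
        | some (k, v) => if k = key then v else d
        | none => d) := by
  rcases h : pvParseLine l with _ | ⟨k, v⟩ <;>
    simp only [pvLk, List.filterMap_cons, h, List.reverse_cons, pvLastValue_append]

theorem pvFold (i : String) :
    ∀ (lines : List String) (m mo s f n : String),
    lines.foldl pvAStep (pvShape i m mo s f n)
    = pvShape i (pvLk lines "macaddress" m) (pvLk lines "model" mo)
        (pvLk lines "serialnumber" s) (pvLk lines "version" f) (pvLk lines "hostname" n)
  | [], m, mo, s, f, n => rfl
  | l :: rest, m, mo, s, f, n => by
    simp only [List.foldl_cons]
    rw [pvAStep_shape]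
    rcases h : pvParseLine l with _ | ⟨k, v⟩ <;>
      simp only [pvLk_cons, h] <;> exact pvFold i rest _ _ _ _ _

theorem pvInfo0 (ip : String) :
    PySem.Dict.ofList [("ip", ip), ("mac", "unknown"), ("model", "unknown"),
      ("serial", "unknown"), ("firmware", "unknown"), ("name", "axis-" ++ ip)]
    = pvShape ip "unknown" "unknown" "unknown" "unknown" ("axis-" ++ ip) := by
  rfl

-- ===== VERDICT =====
theorem parse_device_info_py_spec : Claim_equal_parse_device_info_py := by
  intro response_text ip _
  unfold Spec_parse_device_info_py
  simp only [parse_device_info_py, parse_device_info_py_alt]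
  rw [pvInfo0, pvFold]
  rfl
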